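-- pv_equiv track=rewrite | github.com/ThomasSanna/atelier-de-programmation-L3STI | Atelier 2/Partie 2/Exercice 5/exo5.py | rangerParNombreOccurence
-- ===== SOURCE A (Python) =====
-- def maxOccurence(lst:list)->int:
--   """
--   Retourne le nombre maximum d'occurrences d'un élément dans la liste lst.
--
--   Args:
--       lst (list): La liste des éléments.
--
--   Returns:
--     int: Le nombre maximum d'occurrences d'un élément dans la liste.
--   """
--   maxi = 0
--   for i in range(len(lst)):
--     # vérifie si L'élément courant a plus d'occurrences que le maximum actuel
--     if maxi < lst.count(lst[i]):
--       maxi = lst.count(lst[i])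
--   return maxi
--
-- def rangerParNombreOccurence(lst:list)->list:
--   """
--   Trie la liste lst par nombre d'occurrences décroissantes des éléments.
--
--   Args:
--       lst (list): La liste des éléments.
--
--   Returns:
--       list: La liste triée par nombre d'occurrences décroissantes.
--   """
--   lst.sort()
--   maxOcc = maxOccurence(lst)
--   # crée une liste de listes temporaires pour stocker les éléments par occurrences
--   lTemp = [[] for i in range(maxOcc)]
--   for elt in lst:
--     # ajoute L'élément dans la liste temporaire correspondante
--     lTemp[lst.count(elt)-1].append(elt)
--   lRes = []
--   for i in range(len(lTemp)):
--     # ajoute les éléments des listes temporaires à la liste de résultat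
--     lRes += lTemp[len(lTemp)-(i+1)]
--   return lRes
-- ===== SOURCE B (Python) =====
-- def rangerParNombreOccurence(lst: list) -> list:
--   """
--   Trie la liste lst par nombre d'occurrences decroissantes des elements
--   (egalite d'occurrences: valeurs croissantes). Mutates lst via lst.sort().
--   """
--   lst.sort()
--   # run-length encode the sorted list: one (value, run length) pair per distinct value
--   groups = []
--   for x in lst:
--     if groups and groups[-1][0] == x:
--       groups[-1] = (x, groups[-1][1] + 1)
--     else:
--       groups.append((x, 1))
--   # stable sort by descending run length keeps equal-count groups in ascending value order
--   groups.sort(key=lambda g: -g[1])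
--   return [v for v, c in groups for _ in range(c)]
-- ===== Notes on version B (the rewrite author's own statement) =====
-- stated objective: faster
-- what changed: Replaces A's per-element lst.count() calls and occurrence-indexed bucket array (filled, then read high-to-low) by a run-length encoding of the sorted list followed by one stable sort of the (value, run length) groups by descending run length and a flatten.
import Mathlib
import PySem

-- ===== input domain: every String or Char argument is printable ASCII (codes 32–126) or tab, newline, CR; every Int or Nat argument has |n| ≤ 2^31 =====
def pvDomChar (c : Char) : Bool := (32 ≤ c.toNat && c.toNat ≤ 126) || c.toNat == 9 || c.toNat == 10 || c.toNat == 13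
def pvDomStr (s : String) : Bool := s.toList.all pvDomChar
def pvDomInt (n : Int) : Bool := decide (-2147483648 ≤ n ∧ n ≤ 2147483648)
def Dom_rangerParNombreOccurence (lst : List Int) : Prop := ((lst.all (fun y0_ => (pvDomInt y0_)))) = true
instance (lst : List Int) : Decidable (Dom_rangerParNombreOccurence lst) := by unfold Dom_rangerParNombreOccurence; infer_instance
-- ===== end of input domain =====

-- B replaces A's per-element .count() calls and occurrence-indexed bucket array by a run-length
-- encoding of the sorted list, a stable sort of the (value, run-length) groups by descending
-- run length and a flatten (objective: faster). Both A and B sort lst in place (Python list.sort);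
-- the equivalence proved here is about the return value (the in-place sort is identical anyway).

-- ===== PORT A =====
-- In A every index is in range (lst[i] with i < len, lTemp[count-1] with 1 ≤ count ≤ maxOcc),
-- so pyGetD / getD with a default and .toNat on the nonnegative index are exact here.
def maxOccurence (lst : List Int) : Int :=
  (PySem.List.pyRange 0 (PySem.List.len lst) 1).foldl
    (fun maxi i =>
      if maxi < (PySem.List.count lst (PySem.List.pyGetD lst i 0) : Int)
      then (PySem.List.count lst (PySem.List.pyGetD lst i 0) : Int) else maxi) 0

def rangerParNombreOccurence (lst : List Int) : List Int :=
  let s := PySem.List.sorted lst (fun x => x) false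
  let maxOcc := maxOccurence s
  let lTemp : List (List Int) := (PySem.List.pyRange 0 maxOcc 1).map (fun _ => ([] : List Int))
  let lTemp := s.foldl
    (fun t elt =>
      t.set ((PySem.List.count s elt : Int) - 1).toNat
        (t.getD ((PySem.List.count s elt : Int) - 1).toNat [] ++ [elt])) lTemp
  (PySem.List.pyRange 0 (PySem.List.len lTemp) 1).foldl
    (fun r i => r ++ PySem.List.pyGetD lTemp (PySem.List.len lTemp - (i + 1)) []) []

-- ===== PORT B =====
def rangerParNombreOccurence_alt (lst : List Int) : List Int :=
  let s := PySem.List.sorted lst (fun x => x) false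
  let groups : List (Int × Int) := s.foldl
    (fun gs x =>
      match gs.getLast? with
      | some g => if g.1 = x then gs.dropLast ++ [(x, g.2 + 1)] else gs ++ [(x, 1)]
      | none => gs ++ [(x, 1)])
    []
  let groups := PySem.List.sorted groups (fun g => -g.2) false
  groups.flatMap (fun g => (PySem.List.pyRange 0 g.2 1).map (fun _ => g.1))

-- ===== PRECONDITION & SPEC =====
def Spec_rangerParNombreOccurence (lst : List Int) (out : List Int) : Prop := out = rangerParNombreOccurence_alt lst
instance (lst : List Int) (out : List Int) : Decidable (Spec_rangerParNombreOccurence lst out) := by unfold Spec_rangerParNombreOccurence; infer_instance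

-- ===== CLAIM (what is proved, stated in full; the proofs are below) =====
def Claim_equal_rangerParNombreOccurence : Prop := ∀ (lst : List Int), Dom_rangerParNombreOccurence lst → Spec_rangerParNombreOccurence lst (rangerParNombreOccurence lst)

-- ===== LEMMAS AND PROOFS =====

def pvClasses (M : Nat) : List Nat := (List.range M).map (fun k => M - k)

lemma pvClasses_succ (M : Nat) : pvClasses (M + 1) = (M + 1) :: pvClasses M := by
  simp only [pvClasses, List.range_succ_eq_map, List.map_map, List.map_cons]
  rw [List.cons_eq_cons]
  refine ⟨by omega, List.map_congr_left (fun k _ => ?_)⟩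
  simp only [Function.comp]
  omega

lemma pvClasses_mem {M c : Nat} (h : c ∈ pvClasses M) : 1 ≤ c ∧ c ≤ M := by
  simp [pvClasses] at h
  obtain ⟨k, hk, rfl⟩ := h
  omega

lemma pvClasses_split {M c0 : Nat} (h1 : 1 ≤ c0) (h2 : c0 ≤ M) :
    ∃ hi, pvClasses M = hi ++ c0 :: pvClasses (c0 - 1) ∧ ∀ c ∈ hi, c0 < c := by
  induction M with
  | zero => omega
  | succ M ih =>
    rcases Nat.lt_or_ge M c0 with h | h
    · have : c0 = M + 1 := by omega
      subst this
      exact ⟨[], by simp [pvClasses_succ], by simp⟩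
    · obtain ⟨hi, heq, hgt⟩ := ih h
      exact ⟨(M + 1) :: hi, by simp [pvClasses_succ, heq],
        by intro c hc
           rcases List.mem_cons.1 hc with rfl | hc
           · omega
           · exact hgt c hc⟩

def pvPsi (M : Nat) (s : List Int) : List Int :=
  (pvClasses M).flatMap (fun c => s.filter (fun e => decide (List.count e s = c)))

lemma pvPsi_add (s : List Int) (M d : Nat) (hM : ∀ e ∈ s, List.count e s ≤ M) :
    pvPsi (M + d) s = pvPsi M s := by
  induction d with
  | zero => rfl
  | succ d ih =>
    have : M + (d + 1) = (M + d) + 1 := by omega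
    rw [this]
    unfold pvPsi
    rw [pvClasses_succ, List.flatMap_cons]
    have hnil : s.filter (fun e => decide (List.count e s = M + d + 1)) = [] := by
      rw [List.filter_eq_nil_iff]
      intro e he
      have := hM e he
      simp
      omega
    rw [hnil]
    exact ih

lemma pvPsi_stable (s : List Int) {M M' : Nat}
    (hM : ∀ e ∈ s, List.count e s ≤ M) (hM' : ∀ e ∈ s, List.count e s ≤ M') :
    pvPsi M s = pvPsi M' s := by
  rcases Nat.le_total M M' with h | h
  · obtain ⟨d, rfl⟩ := Nat.exists_eq_add_of_le h
    exact (pvPsi_add s M d hM).symm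
  · obtain ⟨d, rfl⟩ := Nat.exists_eq_add_of_le h
    exact pvPsi_add s M' d hM'

lemma pvMaxOcc_eq (s : List Int) :
    maxOccurence s = s.foldl (fun m e => max m (List.count e s : Int)) 0 := by
  unfold maxOccurence
  have h1 : (PySem.List.pyRange 0 (PySem.List.len s) 1).foldl
      (fun maxi i =>
        if maxi < (PySem.List.count s (PySem.List.pyGetD s i 0) : Int)
        then (PySem.List.count s (PySem.List.pyGetD s i 0) : Int) else maxi) 0
      = ((PySem.List.pyRange 0 (PySem.List.len s) 1).map (fun i => PySem.List.pyGetD s i 0)).foldl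
        (fun maxi e => if maxi < (PySem.List.count s e : Int)
          then (PySem.List.count s e : Int) else maxi) 0 := by
    rw [List.foldl_map]
  rw [h1, PySem.List.map_pyGetD_pyRange_zero]
  apply PySem.List.foldl_congr_mem
  intro acc x _
  simp only [PySem.List.count_eq]
  by_cases h : acc < (List.count x s : Int) <;> simp [h] <;> omega

lemma pvMaxOcc_spec (s : List Int) :
    0 ≤ maxOccurence s ∧ ∀ e ∈ s, (List.count e s : Int) ≤ maxOccurence s := by
  rw [pvMaxOcc_eq]
  exact PySem.List.le_foldl_max_int s (fun e => (List.count e s : Int)) 0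

lemma pvBucket_fold (s : List Int) (p : List Int) :
    ∀ (t : List (List Int)),
    (∀ e ∈ p, ((PySem.List.count s e : Int) - 1).toNat < t.length) →
    (p.foldl (fun t elt =>
        t.set ((PySem.List.count s elt : Int) - 1).toNat
          (t.getD ((PySem.List.count s elt : Int) - 1).toNat [] ++ [elt])) t).length = t.length ∧
    ∀ j : Nat, (p.foldl (fun t elt =>
        t.set ((PySem.List.count s elt : Int) - 1).toNat
          (t.getD ((PySem.List.count s elt : Int) - 1).toNat [] ++ [elt])) t).getD j []
      = t.getD j [] ++ p.filter (fun e => decide ((((PySem.List.count s e : Int) - 1).toNat) = j)) := by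
  induction p with
  | nil => intro t _; simp
  | cons e p ih =>
    intro t hbound
    have hi : ((PySem.List.count s e : Int) - 1).toNat < t.length := hbound e (by simp)
    set i := ((PySem.List.count s e : Int) - 1).toNat with hidef
    set t' := t.set i (t.getD i [] ++ [e]) with ht'
    have hlen' : t'.length = t.length := by simp [ht']
    obtain ⟨hlen, hget⟩ := ih t' (by intro e' he'; rw [hlen']; exact hbound e' (by simp [he']))
    refine ⟨by rw [List.foldl_cons, ← hidef, ← ht', hlen, hlen'], ?_⟩
    intro j
    rw [List.foldl_cons, ← hidef, ← ht', hget j]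
    by_cases hij : i = j
    · subst hij
      have : t'.getD i [] = t.getD i [] ++ [e] := by
        simp [ht', List.getD, hi]
      rw [this, List.filter_cons]
      have hcond : decide ((((PySem.List.count s e : Int) - 1).toNat) = i) = true := by
        simp [hidef]
      rw [hcond]
      simp [List.append_assoc]
    · have : t'.getD j [] = t.getD j [] := by
        simp [ht', List.getD, List.getElem?_set_ne hij]
      rw [this, List.filter_cons]
      have hcond : decide ((((PySem.List.count s e : Int) - 1).toNat) = j) = false := by
        simp only [decide_eq_false_iff_not, ← hidef]
        exact hij
      rw [hcond]
      simp

lemma pvGetD_replicate_nil (n j : Nat) : (List.replicate n ([] : List Int)).getD j [] = [] := by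
  simp [List.getD, List.getElem?_replicate]
  split <;> rfl

lemma pvA_eq_psi (s : List Int) :
    (let maxOcc := maxOccurence s
     let lTemp : List (List Int) := (PySem.List.pyRange 0 maxOcc 1).map (fun _ => ([] : List Int))
     let lTemp := s.foldl
       (fun t elt =>
         t.set ((PySem.List.count s elt : Int) - 1).toNat
           (t.getD ((PySem.List.count s elt : Int) - 1).toNat [] ++ [elt])) lTemp
     (PySem.List.pyRange 0 (PySem.List.len lTemp) 1).foldl
       (fun r i => r ++ PySem.List.pyGetD lTemp (PySem.List.len lTemp - (i + 1)) []) [])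
    = pvPsi (maxOccurence s).toNat s := by
  have hm0 : 0 ≤ maxOccurence s := (pvMaxOcc_spec s).1
  have hmB : ∀ e ∈ s, (List.count e s : Int) ≤ maxOccurence s := (pvMaxOcc_spec s).2
  set n := (maxOccurence s).toNat with hn
  have hmn : maxOccurence s = (n : Int) := by omega
  show (PySem.List.pyRange 0
        (PySem.List.len (s.foldl
          (fun t elt =>
            t.set ((PySem.List.count s elt : Int) - 1).toNat
              (t.getD ((PySem.List.count s elt : Int) - 1).toNat [] ++ [elt]))
          ((PySem.List.pyRange 0 (maxOccurence s) 1).map (fun _ => ([] : List Int))))) 1).foldl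
      (fun r i => r ++ PySem.List.pyGetD
        (s.foldl
          (fun t elt =>
            t.set ((PySem.List.count s elt : Int) - 1).toNat
              (t.getD ((PySem.List.count s elt : Int) - 1).toNat [] ++ [elt]))
          ((PySem.List.pyRange 0 (maxOccurence s) 1).map (fun _ => ([] : List Int))))
        (PySem.List.len (s.foldl
          (fun t elt =>
            t.set ((PySem.List.count s elt : Int) - 1).toNat
              (t.getD ((PySem.List.count s elt : Int) - 1).toNat [] ++ [elt]))
          ((PySem.List.pyRange 0 (maxOccurence s) 1).map (fun _ => ([] : List Int)))) - (i + 1)) []) []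
    = pvPsi n s
  have ht0 : (PySem.List.pyRange 0 (maxOccurence s) 1).map (fun _ => ([] : List Int))
      = List.replicate n ([] : List Int) := by
    rw [hmn, PySem.List.pyRange_zero_natCast, List.map_map]
    rw [show ((fun (_ : Int) => ([] : List Int)) ∘ (fun (k : Nat) => (k : Int)))
          = (fun (_ : Nat) => ([] : List Int)) from rfl]
    rw [List.map_const', List.length_range]
  rw [ht0]
  have hbound : ∀ e ∈ s, ((PySem.List.count s e : Int) - 1).toNat
      < (List.replicate n ([] : List Int)).length := by
    intro e he
    have h1 : 0 < List.count e s := List.count_pos_iff.2 he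
    have h2 := hmB e he
    simp only [PySem.List.count_eq, List.length_replicate]
    omega
  obtain ⟨hlen, hget⟩ := pvBucket_fold s s (List.replicate n ([] : List Int)) hbound
  set T := s.foldl
      (fun t elt =>
        t.set ((PySem.List.count s elt : Int) - 1).toNat
          (t.getD ((PySem.List.count s elt : Int) - 1).toNat [] ++ [elt]))
      (List.replicate n ([] : List Int)) with hT
  have hlenT : PySem.List.len T = (n : Int) := by
    simp only [PySem.List.len, hlen, List.length_replicate]
  rw [hlenT, PySem.List.pyRange_zero_natCast, List.foldl_map]
  have hcongr : ∀ (r : List Int) (k : Nat), k ∈ List.range n →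
      r ++ PySem.List.pyGetD T ((n : Int) - ((k : Int) + 1)) []
      = r ++ s.filter (fun e => decide (List.count e s = n - k)) := by
    intro r k hk
    have hkn : k < n := List.mem_range.1 hk
    have hidx : (n : Int) - ((k : Int) + 1) = ((n - 1 - k : Nat) : Int) := by omega
    rw [hidx, PySem.List.pyGetD_natCast, hget (n - 1 - k)]
    rw [pvGetD_replicate_nil]
    have : s.filter (fun e => decide ((((PySem.List.count s e : Int) - 1).toNat) = n - 1 - k))
        = s.filter (fun e => decide (List.count e s = n - k)) := by
      apply List.filter_congr
      intro e he
      have h1 : 0 < List.count e s := List.count_pos_iff.2 he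
      simp only [PySem.List.count_eq, decide_eq_decide]
      omega
    rw [this]
    simp
  have hfold := PySem.List.foldl_congr_mem
    (l := List.range n) (init := ([] : List Int))
    (f := fun (r : List Int) (k : Nat) => r ++ PySem.List.pyGetD T ((n : Int) - ((k : Int) + 1)) [])
    (g := fun (r : List Int) (k : Nat) => r ++ s.filter (fun e => decide (List.count e s = n - k)))
    (fun acc x hx => hcongr acc x hx)
  rw [hfold, PySem.List.foldl_append_eq_flatMap]
  unfold pvPsi pvClasses
  rw [List.flatMap_map]
  simp

def pvRepl (g : Int × Int) : List Int := List.replicate g.2.toNat g.1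

def pvGood (p : List Int) (gs : List (Int × Int)) : Prop :=
  (∀ g ∈ gs, g.1 ∈ p ∧ g.2 = (List.count g.1 p : Int))
  ∧ (gs.map Prod.fst).Pairwise (· < ·)
  ∧ gs.flatMap pvRepl = p

lemma pvGood_step (p : List Int) (x : Int) (gs : List (Int × Int))
    (hpx : ∀ e ∈ p, e ≤ x) (hg : pvGood p gs) :
    pvGood (p ++ [x]) (match gs.getLast? with
      | some g => if g.1 = x then gs.dropLast ++ [(x, g.2 + 1)] else gs ++ [(x, 1)]
      | none => gs ++ [(x, 1)]) := by
  obtain ⟨h1, h2, h3⟩ := hg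
  rcases hlast : gs.getLast? with _ | g
  · have hnil : gs = [] := List.getLast?_eq_none_iff.1 hlast
    subst hnil
    have hpnil : p = [] := by simpa using h3.symm
    subst hpnil
    refine ⟨?_, by simp, by simp [pvRepl]⟩
    intro g hg
    simp at hg
    subst hg
    simp
  · have hsplit : gs.dropLast ++ [g] = gs := List.dropLast_append_getLast? g hlast
    have hgmem : g ∈ gs := by rw [← hsplit]; simp
    obtain ⟨hgp, hgc⟩ := h1 g hgmem
    have hfst : gs.map Prod.fst = gs.dropLast.map Prod.fst ++ [g.1] := by
      rw [← hsplit]; simp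
    have hlt : ∀ b ∈ gs.dropLast, b.1 < g.1 := by
      have h2' := h2
      rw [hfst] at h2'
      obtain ⟨-, -, hx⟩ := List.pairwise_append.1 h2'
      intro b hb
      exact hx b.1 (List.mem_map_of_mem hb) g.1 (by simp)
    have hle : ∀ b ∈ gs, b.1 ≤ g.1 := by
      intro b hb
      rw [← hsplit] at hb
      rcases List.mem_append.1 hb with h | h
      · exact le_of_lt (hlt b h)
      · simp at h; rw [h]
    have hmemdrop : ∀ b ∈ gs.dropLast, b ∈ gs := by
      intro b hb; rw [← hsplit]; exact List.mem_append_left _ hb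
    by_cases hvx : g.1 = x
    · simp only [hvx, if_true]
      have hc0 : (0 : Int) ≤ g.2 := by rw [hgc]; positivity
      refine ⟨?_, ?_, ?_⟩
      · intro h' hh'
        rcases List.mem_append.1 hh' with h | h
        · obtain ⟨hmp, hmc⟩ := h1 h' (hmemdrop h' h)
          refine ⟨List.mem_append_left _ hmp, ?_⟩
          have hne : h'.1 ≠ x := by have := hlt h' h; omega
          rw [List.count_append, List.count_singleton]
          simp [hne.symm, hmc]
        · simp at h
          rw [h]
          refine ⟨by simp, ?_⟩
          rw [List.count_append, List.count_singleton]
          simp [hgc, ← hvx]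
      · have : (gs.dropLast ++ [(x, g.2 + 1)]).map Prod.fst = gs.map Prod.fst := by
          rw [hfst]; simp [hvx]
        rw [this]; exact h2
      · rw [List.flatMap_append]
        have hrep : pvRepl (x, g.2 + 1) = pvRepl g ++ [x] := by
          simp only [pvRepl]
          have : (g.2 + 1).toNat = g.2.toNat + 1 := by omega
          rw [this, List.replicate_succ', hvx]
        have h3' : gs.dropLast.flatMap pvRepl ++ pvRepl g = p := by
          rw [show pvRepl g = List.flatMap pvRepl [g] by simp, ← List.flatMap_append, hsplit]
          exact h3
        simp [hrep, ← List.append_assoc, h3']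
    · simp only [hvx, if_false]
      have hgx : g.1 < x := lt_of_le_of_ne (hpx g.1 hgp) hvx
      have hxnotp : x ∉ p := by
        intro hxp
        rw [← h3] at hxp
        obtain ⟨g', hg', hx'⟩ := List.mem_flatMap.1 hxp
        have he1 : x = g'.1 := List.eq_of_mem_replicate hx'
        have he2 : g'.1 ≤ g.1 := hle g' hg'
        omega
      refine ⟨?_, ?_, ?_⟩
      · intro h' hh'
        rcases List.mem_append.1 hh' with h | h
        · obtain ⟨hmp, hmc⟩ := h1 h' h
          refine ⟨List.mem_append_left _ hmp, ?_⟩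
          have hne : h'.1 ≠ x := fun hcontra => hxnotp (hcontra ▸ hmp)
          rw [List.count_append, List.count_singleton]
          simp [hne.symm, hmc]
        · simp at h
          rw [h]
          refine ⟨by simp, ?_⟩
          rw [List.count_append, List.count_singleton]
          have : List.count x p = 0 := List.count_eq_zero.2 hxnotp
          simp [this]
      · rw [List.map_append, List.pairwise_append]
        refine ⟨h2, by simp, ?_⟩
        intro a ha b hb
        simp at hb
        subst hb
        obtain ⟨b', hb', rfl⟩ := List.mem_map.1 ha
        have h5 := hle b' hb'
        omega
      · rw [List.flatMap_append, h3]
        simp [pvRepl]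

lemma pvRLE_good (s : List Int) (hs : s.Pairwise (· ≤ ·)) :
    pvGood s (s.foldl
      (fun gs x =>
        match gs.getLast? with
        | some g => if g.1 = x then gs.dropLast ++ [(x, g.2 + 1)] else gs ++ [(x, 1)]
        | none => gs ++ [(x, 1)])
      []) := by
  induction s using List.reverseRecOn with
  | nil => exact ⟨by simp, by simp, by simp⟩
  | append_singleton p x ih =>
    rw [List.foldl_append, List.foldl_cons, List.foldl_nil]
    exact pvGood_step p x _
      (fun e he => (List.pairwise_append.1 hs).2.2 e he x (by simp))
      (ih (List.pairwise_append.1 hs).1)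

def pvPhi (M : Nat) (p : List (Int × Int)) : List (Int × Int) :=
  (pvClasses M).flatMap (fun (c : Nat) => p.filter (fun g => decide (g.2 = (c : Int))))

lemma pvInsertBy_append (before : (Int × Int) → (Int × Int) → Bool) (x : Int × Int)
    (as bs : List (Int × Int)) (h : ∀ a ∈ as, before x a = false) :
    PySem.List.insertBy before x (as ++ bs) = as ++ PySem.List.insertBy before x bs := by
  induction as with
  | nil => simp
  | cons a as ih =>
    have ha : before x a = false := h a (by simp)
    simp only [List.cons_append, PySem.List.insertBy, ha]
    simp only [Bool.false_eq_true, if_false, List.cons.injEq, true_and]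
    exact ih (fun a' ha' => h a' (by simp [ha']))

lemma pvPhi_snoc (M : Nat) (p : List (Int × Int)) (g : Int × Int)
    (h1 : 1 ≤ g.2) (h2 : g.2 ≤ (M : Int)) :
    pvPhi M (p ++ [g])
      = PySem.List.insertBy (fun a b => decide ((fun g => -g.2) a < (fun g => -g.2) b)) g (pvPhi M p) := by
  set c0 := g.2.toNat with hc0
  have hgc0 : g.2 = (c0 : Int) := by omega
  obtain ⟨hi, heq, hgt⟩ := pvClasses_split (c0 := c0) (M := M) (by omega) (by omega)
  have hfil : ∀ (c : Nat), c ≠ c0 →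
      (p ++ [g]).filter (fun g' => decide (g'.2 = (c : Int))) = p.filter (fun g' => decide (g'.2 = (c : Int))) := by
    intro c hc
    rw [List.filter_append]
    have hone : [g].filter (fun g' => decide (g'.2 = (c : Int))) = [] := by
      rw [List.filter_cons, List.filter_nil]
      rw [show decide (g.2 = (c : Int)) = false from by
        simp only [decide_eq_false_iff_not]; omega]
      simp
    rw [hone, List.append_nil]
  have hfilc0 : (p ++ [g]).filter (fun g' => decide (g'.2 = (c0 : Int)))
      = p.filter (fun g' => decide (g'.2 = (c0 : Int))) ++ [g] := by
    rw [List.filter_append]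
    congr 1
    rw [List.filter_cons, List.filter_nil]
    rw [show decide (g.2 = (c0 : Int)) = true from by
      simp only [decide_eq_true_eq]; omega]
    simp
  have hcongr_fm : ∀ (l : List Nat) (F G : Nat → List (Int × Int)),
      (∀ c ∈ l, F c = G c) → l.flatMap F = l.flatMap G := by
    intro l F G h
    rw [List.flatMap_def, List.flatMap_def, List.map_congr_left h]
  have hmemfil : ∀ (c : Nat) (a : Int × Int),
      a ∈ p.filter (fun g' => decide (g'.2 = (c : Int))) → a.2 = (c : Int) := by
    intro c a ha
    have := (List.mem_filter.1 ha).2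
    simpa using this
  unfold pvPhi
  rw [heq, List.flatMap_append, List.flatMap_cons, List.flatMap_append, List.flatMap_cons]
  rw [hfilc0]
  rw [hcongr_fm hi _ _ (fun c hc => hfil c (by have := hgt c hc; omega))]
  rw [hcongr_fm (pvClasses (c0 - 1)) _ _
    (fun c hc => hfil c (by have := (pvClasses_mem hc).1; have := (pvClasses_mem hc).2; omega))]
  have hA : ∀ a ∈ ((hi.flatMap (fun (c : Nat) => p.filter (fun g' => decide (g'.2 = (c : Int)))))
      ++ p.filter (fun g' => decide (g'.2 = (c0 : Int)))),
      (fun a b => decide ((fun g => -g.2) a < (fun g => -g.2) b)) g a = false := by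
    intro a ha
    rcases List.mem_append.1 ha with h | h
    · obtain ⟨c, hc, hmem⟩ := List.mem_flatMap.1 h
      have h5 := hmemfil c a hmem
      have h6 := hgt c hc
      simp only [decide_eq_false_iff_not]
      show ¬(-g.2 < -a.2)
      omega
    · have h5 := hmemfil c0 a h
      simp only [decide_eq_false_iff_not]
      show ¬(-g.2 < -a.2)
      omega
  have hassoc : hi.flatMap (fun (c : Nat) => p.filter (fun g' => decide (g'.2 = (c : Int))))
      ++ (p.filter (fun g' => decide (g'.2 = (c0 : Int)))
        ++ (pvClasses (c0 - 1)).flatMap (fun (c : Nat) => p.filter (fun g' => decide (g'.2 = (c : Int)))))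
      = (hi.flatMap (fun (c : Nat) => p.filter (fun g' => decide (g'.2 = (c : Int))))
        ++ p.filter (fun g' => decide (g'.2 = (c0 : Int))))
        ++ (pvClasses (c0 - 1)).flatMap (fun (c : Nat) => p.filter (fun g' => decide (g'.2 = (c : Int)))) := by
    rw [List.append_assoc]
  rw [hassoc, pvInsertBy_append _ _ _ _ hA]
  have hB : PySem.List.insertBy (fun a b => decide ((fun g => -g.2) a < (fun g => -g.2) b)) g
      ((pvClasses (c0 - 1)).flatMap (fun (c : Nat) => p.filter (fun g' => decide (g'.2 = (c : Int)))))
      = g :: (pvClasses (c0 - 1)).flatMap (fun (c : Nat) => p.filter (fun g' => decide (g'.2 = (c : Int)))) := by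
    cases hlo : (pvClasses (c0 - 1)).flatMap (fun (c : Nat) => p.filter (fun g' => decide (g'.2 = (c : Int)))) with
    | nil => simp [PySem.List.insertBy]
    | cons b bs =>
      have hb : b ∈ (pvClasses (c0 - 1)).flatMap (fun (c : Nat) => p.filter (fun g' => decide (g'.2 = (c : Int)))) := by
        rw [hlo]; simp
      obtain ⟨c, hc, hmem⟩ := List.mem_flatMap.1 hb
      have h5 := hmemfil c b hmem
      have h6 := (pvClasses_mem hc).2
      have h7 := (pvClasses_mem hc).1
      have hbt : (fun a b => decide ((fun g => -g.2) a < (fun g => -g.2) b)) g b = true := by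
        simp only [decide_eq_true_eq]
        show -g.2 < -b.2
        omega
      simp only [PySem.List.insertBy, hbt, if_true]
  rw [hB]
  simp [List.append_assoc]


lemma pvFlatMap_congr {α β : Type} (l : List α) (F G : α → List β)
    (h : ∀ x ∈ l, F x = G x) : l.flatMap F = l.flatMap G := by
  rw [List.flatMap_def, List.flatMap_def, List.map_congr_left h]

lemma pvFlatMap_if {α β : Type} (l : List α) (q : α → Bool) (f : α → List β) :
    (l.filter q).flatMap f = l.flatMap (fun x => if q x then f x else []) := by
  induction l with
  | nil => simp
  | cons a l ih =>
    rw [List.filter_cons]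
    by_cases h : q a = true
    · simp only [h, if_true, List.flatMap_cons, ih]
    · simp only [h]
      simp only [Bool.false_eq_true, if_false, List.flatMap_cons] at *
      simp [h, ih]

lemma pvSorted_groups (gs : List (Int × Int)) (M : Nat) :
    (∀ g ∈ gs, 1 ≤ g.2 ∧ g.2 ≤ (M : Int)) →
    PySem.List.sorted gs (fun g => -g.2) false = pvPhi M gs := by
  rw [PySem.List.sorted_eq_foldl_insertBy]
  induction gs using List.reverseRecOn with
  | nil =>
    intro _
    simp [pvPhi, List.flatMap_def]
  | append_singleton p g ih =>
    intro hb
    rw [List.foldl_append, List.foldl_cons, List.foldl_nil]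
    rw [ih (fun g' hg' => hb g' (by simp [hg']))]
    obtain ⟨hb1, hb2⟩ := hb g (by simp)
    exact (pvPhi_snoc M p g hb1 hb2).symm

lemma pvRange_const (c : Int) (v : Int) (h : 0 ≤ c) :
    (PySem.List.pyRange 0 c 1).map (fun _ => v) = List.replicate c.toNat v := by
  rw [show c = ((c.toNat : Nat) : Int) by omega, PySem.List.pyRange_zero_natCast, List.map_map]
  rw [show ((fun (_ : Int) => v) ∘ (fun (k : Nat) => (k : Int))) = (fun (_ : Nat) => v) from rfl]
  rw [List.map_const', List.length_range]
  congr 1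

lemma pvB_eq_psi (s : List Int) (hs : s.Pairwise (· ≤ ·)) :
    (let groups : List (Int × Int) := s.foldl
       (fun gs x =>
         match gs.getLast? with
         | some g => if g.1 = x then gs.dropLast ++ [(x, g.2 + 1)] else gs ++ [(x, 1)]
         | none => gs ++ [(x, 1)])
       []
     let groups := PySem.List.sorted groups (fun g => -g.2) false
     groups.flatMap (fun g => (PySem.List.pyRange 0 g.2 1).map (fun _ => g.1)))
    = pvPsi s.length s := by
  obtain ⟨h1, h2, h3⟩ := pvRLE_good s hs
  set gs : List (Int × Int) := s.foldl
      (fun gs x =>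
        match gs.getLast? with
        | some g => if g.1 = x then gs.dropLast ++ [(x, g.2 + 1)] else gs ++ [(x, 1)]
        | none => gs ++ [(x, 1)])
      [] with hgs
  show (PySem.List.sorted gs (fun g => -g.2) false).flatMap
      (fun g => (PySem.List.pyRange 0 g.2 1).map (fun _ => g.1)) = pvPsi s.length s
  have hb : ∀ g ∈ gs, 1 ≤ g.2 ∧ g.2 ≤ (s.length : Int) := by
    intro g hg
    obtain ⟨hmem, hc⟩ := h1 g hg
    have hc1 : 0 < List.count g.1 s := List.count_pos_iff.2 hmem
    have hc2 : List.count g.1 s ≤ s.length := List.count_le_length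
    omega
  rw [pvSorted_groups gs s.length hb]
  have hmemphi : ∀ g ∈ pvPhi s.length gs, g ∈ gs := by
    intro g hg
    obtain ⟨c, hc, hmem⟩ := List.mem_flatMap.1 hg
    exact (List.mem_filter.1 hmem).1
  rw [pvFlatMap_congr _ _ pvRepl
    (fun g hg => pvRange_const g.2 g.1 (by have := (hb g (hmemphi g hg)).1; omega))]
  unfold pvPhi
  rw [List.flatMap_assoc]
  unfold pvPsi
  apply pvFlatMap_congr
  intro c hc
  rw [pvFlatMap_if]
  rw [← h3]
  rw [List.filter_flatMap]
  apply pvFlatMap_congr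
  intro g hg
  simp only [pvRepl, List.filter_replicate]
  have hgc := (h1 g hg).2
  have hcnt : List.count g.1 (gs.flatMap pvRepl) = List.count g.1 s := by rw [h3]
  by_cases hcase : g.2 = (c : Int)
  · rw [show (decide (g.2 = (c : Int))) = true by simp [hcase]]
    have : ∀ e : Int, e = g.1 → (decide (List.count e (gs.flatMap pvRepl) = c)) = true := by
      intro e he
      subst he
      simp only [decide_eq_true_eq, hcnt]
      omega
    rw [this g.1 rfl]
  · rw [show (decide (g.2 = (c : Int))) = false by simp [hcase]]
    have : (decide (List.count g.1 (gs.flatMap pvRepl) = c)) = false := by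
      simp only [decide_eq_false_iff_not, hcnt]
      omega
    rw [this]

-- ===== VERDICT (by name: the statement is the Claim_ definition above) =====
theorem rangerParNombreOccurence_spec : Claim_equal_rangerParNombreOccurence := by
  intro lst _
  show rangerParNombreOccurence lst = rangerParNombreOccurence_alt lst
  unfold rangerParNombreOccurence rangerParNombreOccurence_alt
  set s := PySem.List.sorted lst (fun x => x) false with hsdef
  have hs : s.Pairwise (· ≤ ·) := PySem.List.sorted_pairwise lst (fun x => x)
  rw [pvA_eq_psi s, pvB_eq_psi s hs]
  exact pvPsi_stable s
    (fun e he => by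
      have h := (pvMaxOcc_spec s).2 e he
      have h0 := (pvMaxOcc_spec s).1
      omega)
    (fun e he => List.count_le_length)
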